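-- pv_equiv track=rewrite | github.com/TarunT27/HW1 | 03_dictionaries/60_remove_dup_values.py | remove_duplicate_values
-- ===== SOURCE A (Python) =====
-- def remove_duplicate_values(d):
--     """Remove duplicate values from dictionary"""
--     seen_values = set()
--     result = {}
--     for key, value in d.items():
--         if value not in seen_values:
--             result[key] = value
--             seen_values.add(value)
--     return result
-- ===== SOURCE B (Python) =====
-- def remove_duplicate_values(d):
--     """Remove duplicate values from dictionary"""
--     def dedup(pairs):
--         if not pairs:
--             return []
--         k, v = pairs[0]
--         return [(k, v)] + dedup([p for p in pairs[1:] if p[1] != v])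
--     return dict(dedup(list(d.items())))
-- ===== Notes on version B (the rewrite author's own statement) =====
-- stated objective: alternative
-- what changed: B replaces A's single pass with a seen-set by a recursive filter-and-recurse scheme: keep the head pair, delete every later pair with the same value from the remaining list, recurse on that filtered list, and build the dict from the kept pairs at the end; no seen-set or membership test against accumulated state exists.
import Mathlib
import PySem

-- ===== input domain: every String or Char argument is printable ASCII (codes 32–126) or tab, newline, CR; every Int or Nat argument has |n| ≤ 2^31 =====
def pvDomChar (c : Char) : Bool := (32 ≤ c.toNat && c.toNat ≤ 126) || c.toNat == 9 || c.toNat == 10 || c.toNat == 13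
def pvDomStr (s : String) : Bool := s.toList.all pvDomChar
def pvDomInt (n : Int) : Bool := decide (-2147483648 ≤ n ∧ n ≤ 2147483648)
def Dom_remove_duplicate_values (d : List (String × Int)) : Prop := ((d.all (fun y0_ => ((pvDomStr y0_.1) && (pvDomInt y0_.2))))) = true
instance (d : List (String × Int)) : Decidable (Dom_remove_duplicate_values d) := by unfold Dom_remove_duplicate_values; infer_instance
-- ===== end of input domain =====

-- B replaces A's seen-set pass by a recursive filter-and-recurse scheme (keep head, filter out its value, recurse); alternative decomposition, quadratic instead of linear.


-- ===== PORT A =====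
-- for key, value in d.items(): if value not in seen_values: result[key] = value; seen_values.add(value)
def remove_duplicate_values (d : List (String × Int)) : List (String × Int) :=
  (d.foldl
    (fun (st : PySem.Set Int × PySem.Dict String Int) kv =>
      if ¬ (PySem.Set.contains st.1 kv.2 = true) then
        (PySem.Set.add st.1 kv.2, st.2.insert kv.1 kv.2)
      else st)
    (PySem.Set.empty, PySem.Dict.empty)).2.items

-- ===== PORT B =====
-- def dedup(pairs): if not pairs: return []; k,v = pairs[0]; return [(k,v)] + dedup([p for p in pairs[1:] if p[1] != v])
def pvDedup : List (String × Int) → List (String × Int)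
  | [] => []
  | kv :: t => kv :: pvDedup (t.filter (fun p => p.2 ≠ kv.2))
termination_by l => l.length
decreasing_by
  simp only [List.length_unattach, List.length_cons, Nat.lt_succ_iff]
  exact le_trans (List.length_filter_le _ _) (by simp)

-- return dict(dedup(list(d.items())))
def remove_duplicate_values_alt (d : List (String × Int)) : List (String × Int) :=
  ((pvDedup d).foldl
    (fun (acc : PySem.Dict String Int) kv => acc.insert kv.1 kv.2)
    PySem.Dict.empty).items

-- ===== PRECONDITION & SPEC =====
def Spec_remove_duplicate_values (d : List (String × Int)) (out : List (String × Int)) : Prop := out = remove_duplicate_values_alt d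
instance (d : List (String × Int)) (out : List (String × Int)) : Decidable (Spec_remove_duplicate_values d out) := by unfold Spec_remove_duplicate_values; infer_instance

-- ===== CLAIM (what is proved, stated in full; the proofs are below) =====
def Claim_equal_remove_duplicate_values : Prop := ∀ (d : List (String × Int)), Dom_remove_duplicate_values d → Spec_remove_duplicate_values d (remove_duplicate_values d)

-- ===== LEMMAS AND PROOFS =====

-- A's pass, split from the dict building: the sequence of pairs A inserts, tracking the seen-set
def pvDedupS (seen : PySem.Set Int) : List (String × Int) → List (String × Int)
  | [] => []
  | kv :: t =>
      if PySem.Set.contains seen kv.2 then pvDedupS seen t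
      else kv :: pvDedupS (PySem.Set.add seen kv.2) t

lemma foldA_eq (l : List (String × Int)) :
    ∀ (seen : PySem.Set Int) (res : PySem.Dict String Int),
      (l.foldl
        (fun (st : PySem.Set Int × PySem.Dict String Int) kv =>
          if ¬ (PySem.Set.contains st.1 kv.2 = true) then
            (PySem.Set.add st.1 kv.2, st.2.insert kv.1 kv.2)
          else st)
        (seen, res)).2
      = (pvDedupS seen l).foldl (fun acc kv => acc.insert kv.1 kv.2) res := by
  induction l with
  | nil => intro seen res; rfl
  | cons kv t ih =>
      intro seen res
      rw [List.foldl_cons, pvDedupS]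
      by_cases h : PySem.Set.contains seen kv.2 = true
      · rw [if_neg (not_not_intro h), if_pos (by simpa using h)]
        exact ih seen res
      · rw [if_pos h, if_neg (by simpa using h), List.foldl_cons]
        exact ih _ _

lemma contains_add (s : PySem.Set Int) (v x : Int) :
    PySem.Set.contains (PySem.Set.add s v) x = (PySem.Set.contains s x || x == v) := by
  simp only [PySem.Set.add]
  split
  · next h =>
      by_cases hx : x = v
      · subst hx
        have hm : x ∈ s := by simpa [PySem.Set.contains] using h
        simp [PySem.Set.contains, hm]
      · simp [PySem.Set.contains, hx]
  · next h =>
      by_cases hx : x = v <;> simp [PySem.Set.contains, List.mem_append, hx]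

lemma dedupS_eq_dedup (l : List (String × Int)) :
    ∀ (seen : PySem.Set Int),
      pvDedupS seen l = pvDedup (l.filter (fun p => !(PySem.Set.contains seen p.2))) := by
  induction l with
  | nil => intro seen; simp [pvDedupS, pvDedup]
  | cons kv t ih =>
      intro seen
      rw [pvDedupS, List.filter_cons]
      by_cases h : PySem.Set.contains seen kv.2 = true
      · rw [if_pos (by simpa using h), ih seen, h]
        simp
      · have hc : PySem.Set.contains seen kv.2 = false := by simpa using h
        rw [if_neg (by simpa using h), ih (PySem.Set.add seen kv.2), hc]
        simp only [Bool.not_false, if_true]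
        rw [show pvDedup (kv :: List.filter (fun p => !(PySem.Set.contains seen p.2)) t)
              = kv :: pvDedup ((List.filter (fun p => !(PySem.Set.contains seen p.2)) t).filter
                  (fun p => p.2 ≠ kv.2)) from by simp only [pvDedup]]
        refine congrArg (fun z => kv :: z) (congrArg pvDedup ?_)
        rw [List.filter_filter]
        apply List.filter_congr
        intro p _
        rw [contains_add]
        by_cases hp : p.2 = kv.2
        · simp [hp]
        · simp [hp]

-- ===== VERDICT (by name: the statement is the Claim_ definition above) =====
theorem remove_duplicate_values_spec : Claim_equal_remove_duplicate_values := by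
  intro d _
  unfold Spec_remove_duplicate_values remove_duplicate_values remove_duplicate_values_alt
  rw [foldA_eq, dedupS_eq_dedup]
  have : d.filter (fun p => !(PySem.Set.contains PySem.Set.empty p.2)) = d := by
    simp [PySem.Set.contains, PySem.Set.empty]
  rw [this]
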